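-- pv_equiv track=rewrite | github.com/MdAbedin/binarysearch | 0801 - 0900/0857 Permute to Make List Larger.py | solve
-- ===== SOURCE A (Python) =====
-- def solve(a, b):
--     a.sort(reverse=True)
--     b.sort(reverse=True)
--
--     i = 0
--     j = 0
--     ans = 0
--
--     while i < len(a):
--         while j < len(b) and b[j] >= a[i]:
--             j += 1
--
--         if j >= len(b):
--             break
--
--         ans += 1
--         i += 1
--         j += 1
--
--     return ans
-- ===== SOURCE B (Python) =====
-- def solve(a, b):
--     a.sort(reverse=True)
--     b.sort(reverse=True)
--     lo = 0
--     hi = min(len(a), len(b))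
--     while lo < hi:
--         mid = (lo + hi + 1) // 2
--         if all(a[i] > b[len(b) - mid + i] for i in range(mid)):
--             lo = mid
--         else:
--             hi = mid - 1
--     return lo
-- ===== Notes on version B (the rewrite author's own statement) =====
-- stated objective: alternative
-- what changed: Replaces A's greedy pointer walk (nested skip-while over b with a break) by a binary search on the answer k, each step verifying with a direct predicate that the k largest a's elementwise beat the k smallest b's; both sort the arguments in place descending so the observable mutation is identical.
import Mathlib
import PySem

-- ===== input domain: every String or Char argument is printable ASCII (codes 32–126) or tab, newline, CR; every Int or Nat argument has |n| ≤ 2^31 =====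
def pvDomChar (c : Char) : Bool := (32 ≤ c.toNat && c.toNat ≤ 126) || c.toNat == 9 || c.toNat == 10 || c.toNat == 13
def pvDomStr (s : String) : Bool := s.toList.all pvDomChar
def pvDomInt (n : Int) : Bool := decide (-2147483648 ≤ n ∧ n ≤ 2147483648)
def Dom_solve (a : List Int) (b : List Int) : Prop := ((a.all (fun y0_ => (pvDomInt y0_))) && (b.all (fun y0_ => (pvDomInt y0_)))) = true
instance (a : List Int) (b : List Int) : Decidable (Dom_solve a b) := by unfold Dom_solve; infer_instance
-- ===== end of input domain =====

-- B replaces A's greedy pointer walk by a binary search on the answer k, each step verified by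
-- a direct predicate (the k largest a's beat the k smallest b's elementwise); alternative
-- algorithm, same asymptotic cost. Both Pythons sort the argument lists in place descending,
-- so the observable mutation is identical; the equivalence proved is about the return value.

-- ===== PORT A =====
-- inner 'while j < len(b) and b[j] >= a[i]: j += 1' (getD access is guarded by j < length, so exact)
def solveSkip (bs : List Int) (x : Int) (j : Nat) : Nat :=
  if j < bs.length ∧ bs.getD j 0 ≥ x then solveSkip bs x (j + 1) else j
termination_by bs.length - j
decreasing_by omega

-- outer 'while i < len(a): …' with the 'if j >= len(b): break'
def solveLoop (as bs : List Int) (i j : Nat) (ans : Int) : Int :=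
  if i < as.length then
    let j' := solveSkip bs (as.getD i 0) j
    if j' ≥ bs.length then ans
    else solveLoop as bs (i + 1) (j' + 1) (ans + 1)
  else ans
termination_by as.length - i
decreasing_by omega

def solve (a : List Int) (b : List Int) : Int :=
  let as := PySem.List.sorted a (fun x => x) true
  let bs := PySem.List.sorted b (fun x => x) true
  solveLoop as bs 0 0 0

-- ===== PORT B =====
-- 'all(a[i] > b[len(b) - mid + i] for i in range(mid))'; only evaluated with mid ≤ both
-- lengths, where every index is in range, so getD is exact
def okCheck (as bs : List Int) (k : Nat) : Bool :=
  (List.range k).all (fun i => decide (as.getD i 0 > bs.getD (bs.length - k + i) 0))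

-- 'while lo < hi: mid = (lo + hi + 1) // 2; …'
def bsLoop (as bs : List Int) (lo hi : Nat) : Nat :=
  if lo < hi then
    if okCheck as bs ((lo + hi + 1) / 2) then bsLoop as bs ((lo + hi + 1) / 2) hi
    else bsLoop as bs lo ((lo + hi + 1) / 2 - 1)
  else lo
termination_by hi - lo
decreasing_by all_goals omega

def solve_alt (a : List Int) (b : List Int) : Int :=
  let as := PySem.List.sorted a (fun x => x) true
  let bs := PySem.List.sorted b (fun x => x) true
  (bsLoop as bs 0 (min as.length bs.length) : Int)

-- ===== PRECONDITION & SPEC =====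
def Spec_solve (a : List Int) (b : List Int) (out : Int) : Prop := out = solve_alt a b
instance (a : List Int) (b : List Int) (out : Int) : Decidable (Spec_solve a b out) := by unfold Spec_solve; infer_instance

-- ===== CLAIM (what is proved, stated in full; the proofs are below) =====
def Claim_equal_solve : Prop := ∀ (a : List Int) (b : List Int), Dom_solve a b → Spec_solve a b (solve a b)

-- ===== LEMMAS AND PROOFS =====

-- Structural reading of A's loops: peel the largest a, drop the b's that are ≥ it.
def fN : List Int → List Int → Nat
  | [], _ => 0
  | x :: as, bs =>
    match (bs.dropWhile (fun v => decide (v ≥ x))) with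
    | [] => 0
    | _ :: bs' => fN as bs' + 1

-- descending order
def Desc (xs : List Int) : Prop := xs.Pairwise (fun u v => v ≤ u)

-- B's verification predicate as a Prop, with the length bounds attached
def OkP (A B : List Int) (k : Nat) : Prop :=
  k ≤ A.length ∧ k ≤ B.length ∧
    ∀ i, i < k → A.getD i 0 > B.getD (B.length - k + i) 0

theorem fN_cons_eq (x : Int) (as bs : List Int) :
    fN (x :: as) bs =
      (match (bs.dropWhile (fun v => decide (v ≥ x))) with
       | [] => 0
       | _ :: bs' => fN as bs' + 1) := rfl

theorem solveSkip_drop (bs : List Int) (x : Int) (j : Nat) (hj : j ≤ bs.length) :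
    bs.drop (solveSkip bs x j) = (bs.drop j).dropWhile (fun v => decide (v ≥ x)) ∧
      j ≤ solveSkip bs x j ∧ solveSkip bs x j ≤ bs.length := by
  rw [solveSkip]
  by_cases h : j < bs.length ∧ bs.getD j 0 ≥ x
  · have hdrop : bs.drop j = bs[j] :: bs.drop (j + 1) := List.drop_eq_getElem_cons h.1
    have hget : bs.getD j 0 = bs[j] := List.getD_eq_getElem bs 0 h.1
    have ih := solveSkip_drop bs x (j + 1) (by omega)
    rw [if_pos h]
    refine ⟨?_, by omega, ih.2.2⟩
    rw [ih.1, hdrop, List.dropWhile_cons,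
      if_pos (decide_eq_true_eq.mpr (hget ▸ h.2))]
  · rw [if_neg h]
    refine ⟨?_, le_refl _, hj⟩
    by_cases hlt : j < bs.length
    · have hdrop : bs.drop j = bs[j] :: bs.drop (j + 1) := List.drop_eq_getElem_cons hlt
      have hget : bs.getD j 0 = bs[j] := List.getD_eq_getElem bs 0 hlt
      have hnot : ¬ bs[j] ≥ x := by rw [← hget]; tauto
      rw [hdrop, List.dropWhile_cons, if_neg (by simpa using hnot)]
    · have hge : bs.length ≤ j := by omega
      simp [List.drop_eq_nil_of_le hge]
termination_by bs.length - j
decreasing_by omega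

theorem solveLoop_eq_fN (as bs : List Int) (i j : Nat) (ans : Int)
    (hi : i ≤ as.length) (hj : j ≤ bs.length) :
    solveLoop as bs i j ans = ans + fN (as.drop i) (bs.drop j) := by
  rw [solveLoop]
  by_cases h : i < as.length
  · have hdropa : as.drop i = as[i] :: as.drop (i + 1) := List.drop_eq_getElem_cons h
    have hgeta : as.getD i 0 = as[i] := List.getD_eq_getElem as 0 h
    obtain ⟨hd, hle, hub⟩ := solveSkip_drop bs (as.getD i 0) j hj
    set j' := solveSkip bs (as.getD i 0) j with hj'
    rw [hgeta] at hd
    rw [if_pos h]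
    by_cases hend : j' ≥ bs.length
    · have hdw : (bs.drop j).dropWhile (fun v => decide (v ≥ as[i])) = [] := by
        rw [← hd]; exact List.drop_eq_nil_of_le hend
      rw [if_pos hend, hdropa, fN_cons_eq, hdw]
      simp
    · have hlt' : j' < bs.length := by omega
      have hdropb : bs.drop j' = bs[j'] :: bs.drop (j' + 1) := List.drop_eq_getElem_cons hlt'
      have hdw : (bs.drop j).dropWhile (fun v => decide (v ≥ as[i])) = bs[j'] :: bs.drop (j' + 1) := by
        rw [← hd]; exact hdropb
      rw [if_neg hend,
        solveLoop_eq_fN as bs (i + 1) (j' + 1) (ans + 1) (by omega) (by omega),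
        hdropa, fN_cons_eq, hdw]
      push_cast
      ring
  · rw [if_neg h]
    have hnil : as.drop i = [] := List.drop_eq_nil_of_le (by omega)
    simp [hnil, fN]
termination_by as.length - i
decreasing_by omega

-- getD at an in-range index, phrased through getElem
theorem getD_lt {xs : List Int} {i : Nat} (h : i < xs.length) : xs.getD i 0 = xs[i] :=
  List.getD_eq_getElem xs 0 h

-- descending lists are antitone position-wise (via getD)
theorem desc_getD_le {B : List Int} (hB : Desc B) {i j : Nat} (hij : i ≤ j)
    (hj : j < B.length) : B.getD j 0 ≤ B.getD i 0 := by
  rcases Nat.eq_or_lt_of_le hij with rfl | hlt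
  · exact le_refl _
  · rw [getD_lt hj, getD_lt (by omega : i < B.length)]
    exact (List.pairwise_iff_getElem.mp hB) i j (by omega) hj hlt

-- monotone down: if k+1 pairs check out, so do k
theorem okP_pred {A B : List Int} (hB : Desc B) {k : Nat} (h : OkP A B (k + 1)) :
    OkP A B k := by
  obtain ⟨h1, h2, h3⟩ := h
  refine ⟨by omega, by omega, ?_⟩
  intro i hik
  have hgt := h3 i (by omega)
  have hle : B.getD (B.length - k + i) 0 ≤ B.getD (B.length - (k + 1) + i) 0 :=
    desc_getD_le hB (by omega) (by omega)
  omega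

theorem okP_mono {A B : List Int} (hB : Desc B) {j : Nat} (h : OkP A B j) :
    ∀ k, k ≤ j → OkP A B k := by
  induction j with
  | zero => intro k hk; simpa [Nat.le_zero.mp hk] using h
  | succ n ih =>
    intro k hk
    rcases Nat.eq_or_lt_of_le hk with rfl | hlt
    · exact h
    · exact ih (okP_pred hB h) k (by omega)

-- the head of a nonempty dropWhile fails the predicate
theorem dropWhile_head_false (p : Int → Bool) (l : List Int) (c : Int) (cs : List Int)
    (h : l.dropWhile p = c :: cs) : p c = false := by
  induction l with
  | nil => simp at h
  | cons y t ih =>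
    rw [List.dropWhile_cons] at h
    by_cases hp : p y = true
    · rw [if_pos hp] at h; exact ih h
    · rw [if_neg hp] at h
      have : y = c := by injection h
      subst this
      simpa using hp

theorem fN_le (A B : List Int) : fN A B ≤ A.length ∧ fN A B ≤ B.length := by
  induction A generalizing B with
  | nil => simp [fN]
  | cons x as ih =>
    cases hdw : B.dropWhile (fun v => decide (v ≥ x)) with
    | nil =>
      have hfn : fN (x :: as) B = 0 := by rw [fN_cons_eq, hdw]
      simp [hfn]
    | cons c cs =>
      have hfn : fN (x :: as) B = fN as cs + 1 := by rw [fN_cons_eq, hdw]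
      rw [hfn]
      have hlen : cs.length + 1 ≤ B.length := by
        have hs := (List.dropWhile_sublist (l := B) (p := fun v => decide (v ≥ x))).length_le
        rw [hdw] at hs; simpa using hs
      have hih := ih cs
      refine ⟨by simp; omega, by omega⟩

-- A's greedy count verifies B's predicate: the fN largest a's beat the fN smallest b's
theorem okP_fN (A B : List Int) (hA : Desc A) (hB : Desc B) : OkP A B (fN A B) := by
  induction A generalizing B with
  | nil => exact ⟨by simp [fN], by simp [fN], by simp [fN]⟩
  | cons x as ih =>
    cases hdw : B.dropWhile (fun v => decide (v ≥ x)) with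
    | nil =>
      have hfn : fN (x :: as) B = 0 := by rw [fN_cons_eq, hdw]
      exact hfn ▸ ⟨by omega, by omega, by omega⟩
    | cons c cs =>
      have hfn : fN (x :: as) B = fN as cs + 1 := by rw [fN_cons_eq, hdw]
      rw [hfn]
      have hAs : Desc as := (List.pairwise_cons.mp hA).2
      have hsubl : (c :: cs).Sublist B := by rw [← hdw]; exact List.dropWhile_sublist _
      have hcs : Desc cs := (hB.sublist hsubl).sublist (List.sublist_cons_self c cs)
      obtain ⟨hk1, hk2, hk3⟩ := ih cs hAs hcs
      set k := fN as cs with hk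
      set pref := B.takeWhile (fun v => decide (v ≥ x)) with hpref
      have hsplit : B = pref ++ c :: cs := by
        conv_lhs => rw [← List.takeWhile_append_dropWhile (p := fun v => decide (v ≥ x)) (l := B)]
        rw [hdw]
      have hlenB : B.length = pref.length + 1 + cs.length := by
        rw [hsplit]; simp; omega
      have hcx : c < x := by
        have := dropWhile_head_false (fun v => decide (v ≥ x)) B c cs hdw
        simp at this; omega
      refine ⟨by simp; omega, by omega, ?_⟩
      intro i hik
      cases i with
      | zero =>
        have h0 : (x :: as).getD 0 0 = x := rfl
        have hgetc : B.getD pref.length 0 = c := by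
          rw [hsplit, List.getD_append_right _ _ _ _ (le_refl _)]
          simp
        have hle : B.getD (B.length - (k + 1) + 0) 0 ≤ B.getD pref.length 0 :=
          desc_getD_le hB (by omega) (by omega)
        rw [hgetc] at hle
        rw [h0]
        omega
      | succ j =>
        have hjk : j < k := by omega
        have hidx : B.length - (k + 1) + (j + 1) = pref.length + 1 + (cs.length - k + j) := by
          omega
        have hgete : B.getD (pref.length + 1 + (cs.length - k + j)) 0
            = cs.getD (cs.length - k + j) 0 := by
          rw [hsplit, List.getD_append_right _ _ _ _ (by omega)]
          have : pref.length + 1 + (cs.length - k + j) - pref.length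
              = (cs.length - k + j) + 1 := by omega
          rw [this]
          simp
        have hsa : (x :: as).getD (j + 1) 0 = as.getD j 0 := rfl
        rw [hsa, hidx, hgete]
        exact hk3 j hjk

-- A's greedy count is maximal: fN + 1 pairs never check out
theorem not_okP_fN_succ (A B : List Int) (hA : Desc A) (hB : Desc B) :
    ¬ OkP A B (fN A B + 1) := by
  induction A generalizing B with
  | nil => intro h; have := h.1; simp [fN] at this
  | cons x as ih =>
    cases hdw : B.dropWhile (fun v => decide (v ≥ x)) with
    | nil =>
      have hfn : fN (x :: as) B = 0 := by rw [fN_cons_eq, hdw]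
      rw [hfn]
      intro h
      obtain ⟨h1, h2, h3⟩ := h
      have hall : ∀ v ∈ B, x ≤ v := by
        intro v hv
        have := List.dropWhile_eq_nil_iff.mp hdw v hv
        simpa using this
      have hBne : 0 < B.length := by omega
      have hgt := h3 0 (by omega)
      have hlt : B.length - (0 + 1) + 0 < B.length := by omega
      have h0 : (x :: as).getD 0 0 = x := rfl
      rw [h0, getD_lt hlt] at hgt
      have hxle : x ≤ B[B.length - (0 + 1) + 0] := hall _ (List.getElem_mem hlt)
      omega
    | cons c cs =>
      have hfn : fN (x :: as) B = fN as cs + 1 := by rw [fN_cons_eq, hdw]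
      rw [hfn]
      intro h
      obtain ⟨h1, h2, h3⟩ := h
      have hAs : Desc as := (List.pairwise_cons.mp hA).2
      have hsubl : (c :: cs).Sublist B := by rw [← hdw]; exact List.dropWhile_sublist _
      have hcs : Desc cs := (hB.sublist hsubl).sublist (List.sublist_cons_self c cs)
      set k := fN as cs with hk
      set pref := B.takeWhile (fun v => decide (v ≥ x)) with hpref
      have hsplit : B = pref ++ c :: cs := by
        conv_lhs => rw [← List.takeWhile_append_dropWhile (p := fun v => decide (v ≥ x)) (l := B)]
        rw [hdw]
      have hlenB : B.length = pref.length + 1 + cs.length := by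
        rw [hsplit]; simp; omega
      have hask : k + 1 ≤ as.length := by simp at h1; omega
      by_cases hkcs : k + 1 ≤ cs.length
      · -- the k+2 hypothesis restricted to a's tail gives OkP as cs (k+1), contradicting ih
        apply ih cs hAs hcs
        refine ⟨hask, hkcs, ?_⟩
        intro j hjk
        have hgt := h3 (j + 1) (by omega)
        have hidx : B.length - (k + 1 + 1) + (j + 1) = pref.length + 1 + (cs.length - (k + 1) + j) := by
          omega
        have hgete : B.getD (pref.length + 1 + (cs.length - (k + 1) + j)) 0
            = cs.getD (cs.length - (k + 1) + j) 0 := by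
          rw [hsplit, List.getD_append_right _ _ _ _ (by omega)]
          have : pref.length + 1 + (cs.length - (k + 1) + j) - pref.length
              = (cs.length - (k + 1) + j) + 1 := by omega
          rw [this]
          simp
        have hsa : (x :: as).getD (j + 1) 0 = as.getD j 0 := rfl
        rw [hsa, hidx, hgete] at hgt
        exact hgt
      · -- here fN used up all of cs, so the index for i = 0 lands in the prefix,
        -- whose elements are ≥ x, contradicting x > that element
        have hcsk : k ≤ cs.length := (fN_le as cs).2
        have hgt := h3 0 (by omega)
        have hidx : B.length - (k + 1 + 1) + 0 < pref.length := by omega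
        have hgete : ∀ n, n < pref.length → B.getD n 0 = pref.getD n 0 := by
          intro n hn
          conv_lhs => rw [hsplit]
          rw [List.getD_append _ _ _ _ hn]
        have hmem : pref.getD (B.length - (k + 1 + 1) + 0) 0 ∈ pref := by
          rw [getD_lt hidx]; exact List.getElem_mem _
        have hge : x ≤ pref.getD (B.length - (k + 1 + 1) + 0) 0 := by
          rw [hpref] at hmem
          have := List.mem_takeWhile_imp hmem
          simpa using this
        have hx0 : (x :: as).getD 0 0 = x := rfl
        rw [hx0, hgete _ hidx] at hgt
        omega

-- okCheck agrees with OkP's pointwise condition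
theorem okCheck_true_iff (as bs : List Int) (k : Nat) :
    okCheck as bs k = true ↔ ∀ i, i < k → as.getD i 0 > bs.getD (bs.length - k + i) 0 := by
  simp [okCheck]

-- the binary search returns the unique threshold t of a monotone predicate
theorem bsLoop_max (as bs : List Int) (t lo hi : Nat) (hlo : lo ≤ t) (hhi : t ≤ hi)
    (htrue : ∀ k, k ≤ t → okCheck as bs k = true)
    (hfalse : ∀ k, t < k → k ≤ hi → okCheck as bs k = false) :
    bsLoop as bs lo hi = t := by
  rw [bsLoop]
  by_cases h : lo < hi
  · rw [if_pos h]
    by_cases hm : (lo + hi + 1) / 2 ≤ t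
    · rw [if_pos (htrue _ hm)]
      exact bsLoop_max as bs t ((lo + hi + 1) / 2) hi hm hhi htrue hfalse
    · rw [if_neg (by rw [hfalse _ (by omega) (by omega)]; simp)]
      exact bsLoop_max as bs t lo ((lo + hi + 1) / 2 - 1) hlo (by omega) htrue
        (fun k hk1 hk2 => hfalse k hk1 (by omega))
  · rw [if_neg h]
    omega
termination_by hi - lo
decreasing_by all_goals omega

-- ===== VERDICT (by name: the statement is the Claim_ definition above) =====
theorem solve_spec : Claim_equal_solve := by
  intro a b _
  unfold Spec_solve solve solve_alt
  set as := PySem.List.sorted a (fun x => x) true with has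
  set bs := PySem.List.sorted b (fun x => x) true with hbs
  have hA : Desc as := PySem.List.sorted_pairwise_rev (xs := a) (key := fun x => x)
  have hB : Desc bs := PySem.List.sorted_pairwise_rev (xs := b) (key := fun x => x)
  rw [solveLoop_eq_fN as bs 0 0 0 (by omega) (by omega)]
  simp only [List.drop_zero]
  have hok := okP_fN as bs hA hB
  have htrue : ∀ k, k ≤ fN as bs → okCheck as bs k = true := by
    intro k hk
    exact (okCheck_true_iff as bs k).mpr ((okP_mono hB hok k hk).2.2)
  have hfalse : ∀ k, fN as bs < k → k ≤ min as.length bs.length → okCheck as bs k = false := by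
    intro k hk1 hk2
    by_contra hc
    have hcT : okCheck as bs k = true := by
      cases hok' : okCheck as bs k
      · exact absurd hok' hc
      · rfl
    have hOk : OkP as bs k :=
      ⟨by omega, by omega, (okCheck_true_iff as bs k).mp hcT⟩
    exact not_okP_fN_succ as bs hA hB (okP_mono hB hOk (fN as bs + 1) (by omega))
  rw [bsLoop_max as bs (fN as bs) 0 (min as.length bs.length) (Nat.zero_le _)
    (by have := hok; exact le_min this.1 this.2.1) htrue hfalse]
  simp
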